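-- pv_equiv track=rewrite | github.com/amokcatharsis/python_web_application_testing | Sprint_1/task_4.py | tickets_with_priorities
-- ===== SOURCE A (Python) =====
-- def tickets_with_priorities(types, ticket_priorities):
--     result = {}
--
--     for ticket, type in sorted(ticket_priorities.items(), key=lambda ticket_priority: ticket_priority[1]):
--     # Будет круто, если вы расскажете, как ваш же коммент должен использоваться здесь, потому что я всадил
--     # суммарно часов восемь в попытке переделать рабочее решение (зачем-то) и не хочу больше тратить время
--         try:
--             result[types[type]].append(ticket)
--         except KeyError:
--             result[types[type]] = [ticket]
--
--     return result
-- ===== SOURCE B (Python) =====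
-- def tickets_with_priorities(types, ticket_priorities):
--     # group tickets by their category name, categories ordered by first
--     # appearance in priority order, tickets within a category in priority order
--     ordered = sorted(ticket_priorities.items(), key=lambda tp: tp[1])
--     keys = []
--     for _, p in ordered:
--         k = types[p]
--         if k not in keys:
--             keys.append(k)
--     return {k: [t for t, p in ordered if types[p] == k] for k in keys}
-- ===== Notes on version B (the rewrite author's own statement) =====
-- stated objective: alternative
-- what changed: A builds the grouping in a single pass over the sorted items with a mutated dict (try/except append-or-create); B instead collects the category names in order of first appearance and then builds each group with one comprehension per category over the sorted items.
import Mathlib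
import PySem

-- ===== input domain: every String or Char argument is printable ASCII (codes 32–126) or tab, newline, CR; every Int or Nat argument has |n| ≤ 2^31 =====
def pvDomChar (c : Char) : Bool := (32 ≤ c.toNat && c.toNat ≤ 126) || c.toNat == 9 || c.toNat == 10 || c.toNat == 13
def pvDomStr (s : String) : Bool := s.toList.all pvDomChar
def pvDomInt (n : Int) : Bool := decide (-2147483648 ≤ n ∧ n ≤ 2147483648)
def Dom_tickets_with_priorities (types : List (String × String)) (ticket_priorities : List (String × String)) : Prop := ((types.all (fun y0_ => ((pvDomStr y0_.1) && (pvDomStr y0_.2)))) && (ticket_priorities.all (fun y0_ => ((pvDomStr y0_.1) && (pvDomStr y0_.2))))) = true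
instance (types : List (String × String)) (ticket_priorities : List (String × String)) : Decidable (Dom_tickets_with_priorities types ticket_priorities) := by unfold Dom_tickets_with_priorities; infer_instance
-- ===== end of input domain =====

-- B groups in a different decomposition (first-occurrence key list + one comprehension per key)
-- instead of A's dict-accumulating single fold; objective: alternative (not faster).

-- ===== PORT A =====
-- A: sort items by priority, then one pass appending into a dict (try/except = lookup, append or fresh list).
def tickets_with_priorities (types : List (String × String)) (ticket_priorities : List (String × String)) : List (String × List String) :=
  let tdict : PySem.Dict String String := ⟨types⟩
  let s := PySem.List.sorted ticket_priorities (fun tp => tp.2)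
  let result := s.foldl
    (fun (result : PySem.Dict String (List String)) tp =>
      match tdict.get? tp.2 with
      | some k =>
        match result.get? k with
        | some lst => result.insert k (lst ++ [tp.1])   -- try-branch: append in place
        | none => result.insert k [tp.1]                -- except KeyError: fresh list
      | none => result)                                 -- Python raises KeyError here: outside Pre_
    PySem.Dict.empty
  result.items

-- ===== PORT B =====
-- B: sort once, collect category names in order of first appearance, then one comprehension per category.
def tickets_with_priorities_alt (types : List (String × String)) (ticket_priorities : List (String × String)) : List (String × List String) :=
  let tdict : PySem.Dict String String := ⟨types⟩
  let ordered := PySem.List.sorted ticket_priorities (fun tp => tp.2)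
  let keys := ordered.foldl
    (fun (ks : List String) tp =>
      match tdict.get? tp.2 with
      | some k => if k ∈ ks then ks else ks ++ [k]
      | none => ks)                                     -- Python raises KeyError here: outside Pre_
    []
  keys.map (fun k => (k, (ordered.filter (fun tp => tdict.get? tp.2 == some k)).map Prod.fst))

-- ===== PRECONDITION & SPEC =====
-- Pre_ excludes exactly the inputs on which Python A raises KeyError: some ticket's
-- priority is not a key of `types` (B raises there too; A returns nowhere outside Pre_).
def Pre_tickets_with_priorities (types : List (String × String)) (ticket_priorities : List (String × String)) : Prop :=
  ticket_priorities.all (fun tp => (PySem.Dict.get? (⟨types⟩ : PySem.Dict String String) tp.2).isSome) = true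
instance (types : List (String × String)) (ticket_priorities : List (String × String)) : Decidable (Pre_tickets_with_priorities types ticket_priorities) := by unfold Pre_tickets_with_priorities; infer_instance
def pvWitness_tickets_with_priorities : (List (String × String)) × (List (String × String)) :=
  ([("low", "Bug"), ("high", "Feature")], [("t1", "low"), ("t2", "high"), ("t3", "low")])

def Spec_tickets_with_priorities (types : List (String × String)) (ticket_priorities : List (String × String)) (out : List (String × List String)) : Prop := out = tickets_with_priorities_alt types ticket_priorities
instance (types : List (String × String)) (ticket_priorities : List (String × String)) (out : List (String × List String)) : Decidable (Spec_tickets_with_priorities types ticket_priorities out) := by unfold Spec_tickets_with_priorities; infer_instance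

-- ===== CLAIM (what is proved, stated in full; the proofs are below) =====
def Claim_equal_tickets_with_priorities : Prop := ∀ (types : List (String × String)) (ticket_priorities : List (String × String)), Dom_tickets_with_priorities types ticket_priorities → Pre_tickets_with_priorities types ticket_priorities → Spec_tickets_with_priorities types ticket_priorities (tickets_with_priorities types ticket_priorities)

-- ===== LEMMAS AND PROOFS =====

-- tickets of s whose category (under f) is k, in order
def pvGrab (f : String × String → Option String) (k : String) (s : List (String × String)) : List String :=
  (s.filter (fun tp => f tp == some k)).map Prod.fst

-- category names of s in order of first appearance, skipping those already in `seen`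
def pvNewKeys (f : String × String → Option String) : List (String × String) → List String → List String
  | [], _ => []
  | tp :: s, seen =>
    match f tp with
    | none => pvNewKeys f s seen
    | some k => if k ∈ seen then pvNewKeys f s seen else k :: pvNewKeys f s (seen ++ [k])

-- the tail of A's result contributed by fresh keys of s
def pvNewPart (f : String × String → Option String) : List (String × String) → List String → List (String × List String)
  | [], _ => []
  | tp :: s, seen =>
    match f tp with
    | none => pvNewPart f s seen
    | some k =>
      if k ∈ seen then pvNewPart f s seen
      else (k, tp.1 :: pvGrab f k s) :: pvNewPart f s (seen ++ [k])

-- A's loop body and B's key-collecting loop body, abstracted over the category lookup f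
def pvStepA (f : String × String → Option String) (r : PySem.Dict String (List String)) (tp : String × String) : PySem.Dict String (List String) :=
  match f tp with
  | some k =>
    match r.get? k with
    | some lst => r.insert k (lst ++ [tp.1])
    | none => r.insert k [tp.1]
  | none => r

def pvStepK (f : String × String → Option String) (ks : List String) (tp : String × String) : List String :=
  match f tp with
  | some k => if k ∈ ks then ks else ks ++ [k]
  | none => ks

lemma pvGrab_cons_eq (f : String × String → Option String) (k : String) (tp : String × String)
    (s : List (String × String)) (h : f tp = some k) :
    pvGrab f k (tp :: s) = tp.1 :: pvGrab f k s := by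
  simp [pvGrab, h]

lemma pvGrab_cons_ne (f : String × String → Option String) (k : String) (tp : String × String)
    (s : List (String × String)) (h : f tp ≠ some k) :
    pvGrab f k (tp :: s) = pvGrab f k s := by
  simp [pvGrab, h]

lemma pvNewKeys_not_mem_seen (f : String × String → Option String) :
    ∀ (s : List (String × String)) (seen : List String) (k : String),
      k ∈ pvNewKeys f s seen → k ∉ seen := by
  intro s
  induction s with
  | nil => intro seen k h; simp [pvNewKeys] at h
  | cons tp s ih =>
    intro seen k h
    simp only [pvNewKeys] at h
    cases hf : f tp with
    | none => exact ih seen k (by rwa [hf] at h)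
    | some k' =>
      rw [hf] at h
      by_cases hk' : k' ∈ seen
      · simp [hk'] at h; exact ih seen k h
      · simp [hk'] at h
        rcases h with h | h
        · subst h; exact hk'
        · intro hks
          exact ih (seen ++ [k']) k h (by simp [hks])

lemma pvKeysFold_eq (f : String × String → Option String) :
    ∀ (s : List (String × String)) (seen : List String),
      s.foldl (pvStepK f) seen = seen ++ pvNewKeys f s seen := by
  intro s
  induction s with
  | nil => intro seen; simp [pvNewKeys]
  | cons tp s ih =>
    intro seen
    simp only [List.foldl_cons, pvStepK, pvNewKeys]
    cases hf : f tp with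
    | none => simpa using ih seen
    | some k =>
      by_cases hk : k ∈ seen
      · simpa [hk] using ih seen
      · simpa [hk] using ih (seen ++ [k])

lemma pvNewPart_eq_map (f : String × String → Option String) :
    ∀ (s : List (String × String)) (seen : List String),
      pvNewPart f s seen = (pvNewKeys f s seen).map (fun k => (k, pvGrab f k s)) := by
  intro s
  induction s with
  | nil => intro seen; simp [pvNewPart, pvNewKeys]
  | cons tp s ih =>
    intro seen
    simp only [pvNewPart, pvNewKeys]
    cases hf : f tp with
    | none =>
      rw [ih seen]
      refine List.map_congr_left ?_
      intro k hk
      rw [pvGrab_cons_ne f k tp s (by simp [hf])]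
    | some k =>
      by_cases hk : k ∈ seen
      · simp only [hk, if_true]
        rw [ih seen]
        refine List.map_congr_left ?_
        intro k' hk'
        have hne : k' ≠ k := fun h => (pvNewKeys_not_mem_seen f s seen k' hk') (h ▸ hk)
        rw [pvGrab_cons_ne f k' tp s (by simp [hf, hne.symm])]
      · simp only [hk, if_false, List.map_cons]
        rw [pvGrab_cons_eq f k tp s hf, ih (seen ++ [k])]
        refine congrArg _ ?_
        refine List.map_congr_left ?_
        intro k' hk'
        have hne : k' ≠ k := by
          intro h
          exact (pvNewKeys_not_mem_seen f s (seen ++ [k]) k' hk') (by simp [h])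
        rw [pvGrab_cons_ne f k' tp s (by simp [hf, hne.symm])]

-- updating the (unique) entry of key k and then appending g-tails = appending h-tails directly
lemma pvMapUpdate (k t : String) (g h : String → List String) (hk : h k = t :: g k)
    (hne : ∀ k', k' ≠ k → h k' = g k') :
    ∀ (d : List (String × List String)), (d.map Prod.fst).Nodup →
      ∀ lst, PySem.Dict.get? (⟨d⟩ : PySem.Dict String (List String)) k = some lst →
      (d.map (fun p => if p.1 == k then (k, lst ++ [t]) else p)).map (fun kv => (kv.1, kv.2 ++ g kv.1))
        = d.map (fun kv => (kv.1, kv.2 ++ h kv.1)) := by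
  intro d
  induction d with
  | nil => intro _ lst hget; simp [PySem.Dict.get?] at hget
  | cons p d ih =>
    intro hnd lst hget
    simp only [List.map_cons, List.nodup_cons] at hnd
    by_cases hp : p.1 = k
    · have hget' : lst = p.2 := by
        simp [PySem.Dict.get?, hp] at hget
        exact hget.symm
      subst hget'
      simp only [List.map_cons, hp, beq_self_eq_true, if_true]
      refine congrArg₂ _ ?_ ?_
      · simp [hp, hk]
      · have hnotin : ∀ q ∈ d, (q.1 == k) = false := by
          intro q hq
          rw [beq_eq_false_iff_ne]
          intro hqe
          exact hnd.1 (by rw [hp]; exact hqe ▸ List.mem_map_of_mem hq)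
        rw [List.map_map]
        refine List.map_congr_left ?_
        intro q hq
        have hq1 : q.1 ≠ k := by simpa using hnotin q hq
        simp [Function.comp, hnotin q hq, hne q.1 hq1]
    · have hget' : PySem.Dict.get? (⟨d⟩ : PySem.Dict String (List String)) k = some lst := by
        simpa [PySem.Dict.get?, List.find?_cons, hp] using hget
      simp only [List.map_cons, show (p.1 == k) = false by simp [hp], Bool.false_eq_true, if_false]
      refine congrArg₂ _ ?_ (ih hnd.2 lst hget')
      simp [hne p.1 hp]

lemma pvGet?_none_iff (d : List (String × List String)) (k : String) :
    PySem.Dict.get? (⟨d⟩ : PySem.Dict String (List String)) k = none ↔ k ∉ d.map Prod.fst := by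
  simp only [PySem.Dict.get?, Option.map_eq_none_iff]
  rw [List.find?_eq_none]
  constructor
  · intro h hk
    rcases List.mem_map.mp hk with ⟨p, hp, hpk⟩
    exact (h p hp) (by simpa using hpk)
  · intro h p hp
    simp only [beq_iff_eq]
    intro hpk
    exact h (List.mem_map.mpr ⟨p, hp, hpk⟩)

lemma pvContains_iff (d : List (String × List String)) (k : String) :
    PySem.Dict.contains (⟨d⟩ : PySem.Dict String (List String)) k = true ↔ k ∈ d.map Prod.fst := by
  rw [PySem.Dict.contains_iff_mem_keys]
  simp [PySem.Dict.keys]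

lemma pvFoldA_eq (f : String × String → Option String) :
    ∀ (s : List (String × String)) (d : List (String × List String)),
      (d.map Prod.fst).Nodup →
      (s.foldl (pvStepA f) ⟨d⟩).items
        = d.map (fun kv => (kv.1, kv.2 ++ pvGrab f kv.1 s)) ++ pvNewPart f s (d.map Prod.fst) := by
  intro s
  induction s with
  | nil =>
    intro d _
    simp [pvNewPart, pvGrab]
  | cons tp s ih =>
    intro d hnd
    simp only [List.foldl_cons, pvStepA, pvNewPart]
    cases hf : f tp with
    | none =>
      simp only []
      rw [ih d hnd]
      refine congrArg₂ _ ?_ rfl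
      refine List.map_congr_left ?_
      intro kv _
      rw [pvGrab_cons_ne f kv.1 tp s (by simp [hf])]
    | some k =>
      cases hget : PySem.Dict.get? (⟨d⟩ : PySem.Dict String (List String)) k with
      | none =>
        simp only [hget]
        have hk : k ∉ d.map Prod.fst := (pvGet?_none_iff d k).mp hget
        have hins : PySem.Dict.insert (⟨d⟩ : PySem.Dict String (List String)) k [tp.1]
            = ⟨d ++ [(k, [tp.1])]⟩ := by
          simp only [PySem.Dict.insert]
          rw [if_neg (fun hc => hk ((pvContains_iff d k).mp hc))]
        rw [hins, ih (d ++ [(k, [tp.1])])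
          (by rw [List.map_append, List.nodup_append]
              refine ⟨hnd, List.nodup_singleton _, ?_⟩
              intro a ha b hb hab
              have hb' : b = k := by simpa using hb
              exact hk (hb' ▸ hab ▸ ha))]
        simp only [List.map_append, List.map_cons, List.map_nil, hk, if_false]
        rw [List.append_assoc]
        refine congrArg₂ _ ?_ ?_
        · refine List.map_congr_left ?_
          intro kv hkv
          have : kv.1 ≠ k := fun h => hk (h ▸ List.mem_map_of_mem hkv)
          rw [pvGrab_cons_ne f kv.1 tp s (by simp [hf, this.symm])]
        · rfl
      | some lst =>
        simp only [hget]
        have hk : k ∈ d.map Prod.fst := by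
          by_contra hk
          simp [(pvGet?_none_iff d k).mpr hk] at hget
        rw [if_pos hk]
        have hins : PySem.Dict.insert (⟨d⟩ : PySem.Dict String (List String)) k (lst ++ [tp.1])
            = ⟨d.map (fun p => if p.1 == k then (k, lst ++ [tp.1]) else p)⟩ := by
          simp only [PySem.Dict.insert]
          rw [if_pos ((pvContains_iff d k).mpr hk)]
        have hkeys : (d.map (fun p => if p.1 == k then (k, lst ++ [tp.1]) else p)).map Prod.fst
            = d.map Prod.fst := by
          rw [List.map_map]
          refine List.map_congr_left ?_
          intro p _
          by_cases hp : p.1 = k <;> simp [hp]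
        rw [hins, ih _ (by rw [hkeys]; exact hnd)]
        rw [hkeys]
        refine congrArg₂ _ ?_ rfl
        exact pvMapUpdate k tp.1 (fun k' => pvGrab f k' s) (fun k' => pvGrab f k' (tp :: s))
          (pvGrab_cons_eq f k tp s hf)
          (fun k' hk' => pvGrab_cons_ne f k' tp s (by simp [hf, hk'.symm]))
          d hnd lst hget

-- ===== VERDICT (by name: the statement is the Claim_ definition above) =====
theorem tickets_with_priorities_spec : Claim_equal_tickets_with_priorities := by
  intro types ticket_priorities _ _
  unfold Spec_tickets_with_priorities tickets_with_priorities tickets_with_priorities_alt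
  set f : String × String → Option String :=
    fun tp => PySem.Dict.get? (⟨types⟩ : PySem.Dict String String) tp.2 with hfdef
  set s := PySem.List.sorted ticket_priorities (fun tp => tp.2) with hsdef
  have hA : (s.foldl (pvStepA f) (⟨[]⟩ : PySem.Dict String (List String))).items
      = pvNewPart f s [] := by
    rw [pvFoldA_eq f s [] (by simp)]
    simp
  have hB : s.foldl (pvStepK f) [] = pvNewKeys f s [] := by
    rw [pvKeysFold_eq f s []]
    simp
  show (s.foldl (pvStepA f) PySem.Dict.empty).items
      = (s.foldl (pvStepK f) []).map
          (fun k => (k, (s.filter (fun tp => f tp == some k)).map Prod.fst))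
  rw [show (PySem.Dict.empty : PySem.Dict String (List String)) = ⟨[]⟩ from rfl, hA, hB,
    pvNewPart_eq_map f s []]
  simp [pvGrab]
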